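-- pv_equiv track=rewrite | github.com/lesc-ufv/Autentica-o-Multimodal | main.py | limita
-- ===== SOURCE A (Python) =====
-- def limita(vetor, labels, limite_inf, limite_sup):
--     vetor_limitado = []
--     for i in range(len(vetor)):
--         if i == 0 or labels[i] != labels[i - 1]:
--             qnt = 0
--         if limite_inf <= qnt < limite_sup:
--             vetor_limitado.append(vetor[i])
--         qnt += 1
--     return vetor_limitado
-- ===== SOURCE B (Python) =====
-- def limita(vetor, labels, limite_inf, limite_sup):
--     def posicao(i):
--         # occurrence index of i inside its run of consecutive equal labels,
--         # recomputed from scratch by walking backwards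
--         p = 0
--         while i > 0 and labels[i] == labels[i - 1]:
--             p += 1
--             i -= 1
--         return p
--     return [vetor[i] for i in range(len(vetor)) if limite_inf <= posicao(i) < limite_sup]
-- ===== Notes on version B (the rewrite author's own statement) =====
-- stated objective: alternative
-- what changed: B keeps no running state: instead of A's single pass with a counter reset at run boundaries, it recomputes each index's within-run position from scratch with a stateless backward scan and selects via a comprehension.
import Mathlib
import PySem

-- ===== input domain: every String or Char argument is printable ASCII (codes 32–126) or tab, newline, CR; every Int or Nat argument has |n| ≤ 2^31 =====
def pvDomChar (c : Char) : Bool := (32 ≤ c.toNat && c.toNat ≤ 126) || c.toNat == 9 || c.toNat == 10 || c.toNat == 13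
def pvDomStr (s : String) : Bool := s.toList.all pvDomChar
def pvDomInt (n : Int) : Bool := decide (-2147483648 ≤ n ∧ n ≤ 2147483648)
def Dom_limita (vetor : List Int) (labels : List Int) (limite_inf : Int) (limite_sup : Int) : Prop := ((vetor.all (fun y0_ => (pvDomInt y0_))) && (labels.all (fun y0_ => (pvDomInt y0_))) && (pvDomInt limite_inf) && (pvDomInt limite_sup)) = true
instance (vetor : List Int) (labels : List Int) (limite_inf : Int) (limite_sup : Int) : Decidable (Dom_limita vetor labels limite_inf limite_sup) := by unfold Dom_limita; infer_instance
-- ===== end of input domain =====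

-- B replaces A's single pass with a reset counter by a stateless per-index backward scan
-- recomputing each index's within-run position; objective: alternative. Equal returns on Pre_.

-- ===== PORT A =====
def limita (vetor : List Int) (labels : List Int) (limite_inf : Int) (limite_sup : Int) : List Int :=
  ((PySem.List.pyRange 0 (vetor.length : Int) 1).foldl
    (fun (st : Int × List Int) i =>
      let qnt : Int :=
        if i = 0 ∨ PySem.List.pyGetD labels i 0 ≠ PySem.List.pyGetD labels (i - 1) 0 then 0 else st.1
      let acc : List Int :=
        if limite_inf ≤ qnt ∧ qnt < limite_sup then st.2 ++ [PySem.List.pyGetD vetor i 0] else st.2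
      (qnt + 1, acc))
    (0, [])).2

-- ===== PORT B =====
-- posicao(i): while i > 0 and labels[i] == labels[i-1]: p += 1; i -= 1 — a stateless
-- backward walk accumulating p; transliterated as structural recursion on i.
def posicao (labels : List Int) : Nat → Int → Int
  | 0, p => p
  | j + 1, p =>
      if PySem.List.pyGetD labels ((j : Int) + 1) 0 == PySem.List.pyGetD labels (j : Int) 0
      then posicao labels j (p + 1) else p

def limita_alt (vetor : List Int) (labels : List Int) (limite_inf : Int) (limite_sup : Int) : List Int :=
  (PySem.List.pyRange 0 (vetor.length : Int) 1).filterMap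
    (fun i =>
      let p := posicao labels i.toNat 0
      if limite_inf ≤ p ∧ p < limite_sup then some (PySem.List.pyGetD vetor i 0) else none)

-- ===== PRECONDITION & SPEC =====
-- Pre_ excludes exactly the inputs where A raises IndexError (len(vetor) ≥ 2 with labels
-- shorter than vetor); B raises the same IndexError there.
def Pre_limita (vetor : List Int) (labels : List Int) (limite_inf : Int) (limite_sup : Int) : Prop :=
  vetor.length ≤ 1 ∨ vetor.length ≤ labels.length
instance (vetor : List Int) (labels : List Int) (limite_inf : Int) (limite_sup : Int) : Decidable (Pre_limita vetor labels limite_inf limite_sup) := by unfold Pre_limita; infer_instance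
def pvWitness_limita : List Int × List Int × Int × Int := ([1, 2, 3, 4], [7, 7, 8, 7], 0, 2)

def Spec_limita (vetor : List Int) (labels : List Int) (limite_inf : Int) (limite_sup : Int) (out : List Int) : Prop := out = limita_alt vetor labels limite_inf limite_sup
instance (vetor : List Int) (labels : List Int) (limite_inf : Int) (limite_sup : Int) (out : List Int) : Decidable (Spec_limita vetor labels limite_inf limite_sup out) := by unfold Spec_limita; infer_instance

-- ===== CLAIM (what is proved, stated in full; the proofs are below) =====
def Claim_equal_limita : Prop := ∀ (vetor : List Int) (labels : List Int) (limite_inf : Int) (limite_sup : Int), Dom_limita vetor labels limite_inf limite_sup → Pre_limita vetor labels limite_inf limite_sup → Spec_limita vetor labels limite_inf limite_sup (limita vetor labels limite_inf limite_sup)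

-- ===== LEMMAS AND PROOFS =====

def posIdx (labels : List Int) : Nat → Nat
  | 0 => 0
  | i + 1 =>
      if PySem.List.pyGetD labels ((i : Int) + 1) 0 = PySem.List.pyGetD labels (i : Int) 0
      then posIdx labels i + 1 else 0

def keepI (vetor labels : List Int) (li ls : Int) (i : Int) : Option Int :=
  if li ≤ (posIdx labels i.toNat : Int) ∧ (posIdx labels i.toNat : Int) < ls
  then some (PySem.List.pyGetD vetor i 0) else none

theorem limita_char (vetor labels : List Int) (li ls : Int) (n : Nat) :
    (PySem.List.pyRange 0 (n : Int) 1).foldl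
      (fun (st : Int × List Int) i =>
        let qnt : Int :=
          if i = 0 ∨ PySem.List.pyGetD labels i 0 ≠ PySem.List.pyGetD labels (i - 1) 0 then 0 else st.1
        let acc : List Int :=
          if li ≤ qnt ∧ qnt < ls then st.2 ++ [PySem.List.pyGetD vetor i 0] else st.2
        (qnt + 1, acc))
      (0, [])
    = ((if n = 0 then 0 else (posIdx labels (n - 1) : Int) + 1),
       (PySem.List.pyRange 0 (n : Int) 1).filterMap (keepI vetor labels li ls)) := by
  induction n with
  | zero => simp [PySem.List.pyRange_one_eq_nil]
  | succ n ih =>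
    have h1 : ((n + 1 : Nat) : Int) = (n : Int) + 1 := by push_cast; ring
    rw [h1, PySem.List.pyRange_one_succ_right (Int.natCast_nonneg n), List.foldl_append,
        List.filterMap_append, ih]
    simp only [List.foldl_cons, List.foldl_nil, List.filterMap_cons, List.filterMap_nil]
    have hq : (if ((n : Nat) : Int) = 0 ∨ PySem.List.pyGetD labels ((n : Nat) : Int) 0 ≠ PySem.List.pyGetD labels (((n : Nat) : Int) - 1) 0
               then (0 : Int) else (if n = 0 then (0 : Int) else (posIdx labels (n - 1) : Int) + 1))
        = (posIdx labels n : Int) := by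
      cases n with
      | zero => simp [posIdx]
      | succ m =>
        have hc : ((m + 1 : Nat) : Int) = (m : Int) + 1 := by push_cast; ring
        have hs : ((m : Int) + 1) - 1 = (m : Int) := by ring
        rw [hc, hs]
        by_cases heq : PySem.List.pyGetD labels ((m : Int) + 1) 0 = PySem.List.pyGetD labels (m : Int) 0
        · have hp : posIdx labels (m + 1) = posIdx labels m + 1 := by
            rw [posIdx, if_pos heq]
          rw [if_neg (fun hor => hor.elim (fun h => by omega) (fun h => h heq)), hp]
          simp
        · have hp : posIdx labels (m + 1) = 0 := by
            rw [posIdx, if_neg heq]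
          rw [if_pos (Or.inr heq), hp]
          simp
    rw [hq]
    have hk : keepI vetor labels li ls ((n : Nat) : Int)
        = (if li ≤ (posIdx labels n : Int) ∧ (posIdx labels n : Int) < ls
           then some (PySem.List.pyGetD vetor ((n : Nat) : Int) 0) else none) := by
      simp [keepI]
    simp only [Prod.mk.injEq]
    refine ⟨by simp, ?_⟩
    · rw [hk]
      by_cases hcond : li ≤ (posIdx labels n : Int) ∧ (posIdx labels n : Int) < ls <;>
        simp [hcond]

theorem posicao_eq (labels : List Int) : ∀ (i : Nat) (p : Int),
    posicao labels i p = p + (posIdx labels i : Int) := by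
  intro i
  induction i with
  | zero => intro p; simp [posicao, posIdx]
  | succ j ih =>
    intro p
    by_cases h : PySem.List.pyGetD labels ((j : Int) + 1) 0 = PySem.List.pyGetD labels (j : Int) 0
    · rw [posicao, if_pos (beq_iff_eq.mpr h), ih, posIdx, if_pos h]
      push_cast; ring
    · rw [posicao, if_neg (fun hb => h (eq_of_beq hb)), posIdx, if_neg h]
      simp

theorem limita_alt_char (vetor labels : List Int) (li ls : Int) :
    limita_alt vetor labels li ls
      = (PySem.List.pyRange 0 (vetor.length : Int) 1).filterMap (keepI vetor labels li ls) := by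
  unfold limita_alt
  apply List.filterMap_congr
  intro i _
  simp only [posicao_eq, keepI, zero_add]

-- ===== VERDICT (by name: the statement is the Claim_ definition above) =====
theorem limita_spec : Claim_equal_limita := by
  intro vetor labels li ls _ _
  unfold Spec_limita limita
  rw [limita_char vetor labels li ls vetor.length, limita_alt_char vetor labels li ls]
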